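-- pv_equiv track=rewrite | github.com/RickF-dotcom/motor-fgi | maturacao.py | _frequencias_por_elemento
-- ===== SOURCE A (Python) =====
-- from typing import List, Dict, Literal, Tuple
--
-- def _frequencias_por_elemento(historico: List[List[int]], tamanho_janela: int) -> Dict[int, int]:
--     """
--     Conta quantas vezes cada elemento 1..25 aparece na última 'tamanho_janela' entradas.
--     Se não houver dados suficientes, usa todo o histórico disponível.
--     """
--     if not historico:
--         return {d: 0 for d in range(1, 26)}
--
--     janela = historico[-tamanho_janela:] if len(historico) >= tamanho_janela else historico[:]
--     contagem = {d: 0 for d in range(1, 26)}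
--     for concurso in janela:
--         for d in concurso:
--             if 1 <= d <= 25:
--                 contagem[d] += 1
--     return contagem
-- ===== SOURCE B (Python) =====
-- def _frequencias_por_elemento(historico, tamanho_janela):
--     janela = historico[-tamanho_janela:] if len(historico) >= tamanho_janela else historico[:]
--     return {d: sum(row.count(d) for row in janela) for d in range(1, 26)}
-- ===== Notes on version B (the rewrite author's own statement) =====
-- stated objective: simpler
-- what changed: Replaces the empty-history guard and the single accumulating dict-tally pass with a dict comprehension that, for each target value 1..25, counts its occurrences across the window rows (transposed traversal); empty input falls out naturally.
import Mathlib
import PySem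

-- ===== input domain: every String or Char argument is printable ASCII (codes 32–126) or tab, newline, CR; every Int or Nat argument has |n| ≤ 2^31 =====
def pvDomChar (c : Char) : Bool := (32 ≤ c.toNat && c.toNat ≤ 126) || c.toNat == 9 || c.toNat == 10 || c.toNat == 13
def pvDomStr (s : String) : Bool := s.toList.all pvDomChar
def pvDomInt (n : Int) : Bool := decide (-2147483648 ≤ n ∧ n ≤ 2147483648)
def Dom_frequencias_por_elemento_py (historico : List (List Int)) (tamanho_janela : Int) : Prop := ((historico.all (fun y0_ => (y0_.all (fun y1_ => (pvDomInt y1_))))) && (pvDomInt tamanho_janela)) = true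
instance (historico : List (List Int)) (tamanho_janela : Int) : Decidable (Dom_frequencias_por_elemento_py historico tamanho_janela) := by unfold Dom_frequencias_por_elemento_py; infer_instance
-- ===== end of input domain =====

-- B replaces A's empty-history guard and single accumulating dict-tally pass by a
-- per-target-value counting comprehension over the window (simpler; same result).
-- ===== PORT A =====
def frequencias_por_elemento_py (historico : List (List Int)) (tamanho_janela : Int) : List (Int × Int) :=
  if historico = [] then
    ((PySem.List.pyRange 1 26).foldl (fun c d => c.insert d 0) PySem.Dict.empty).items
  else
    let janela := if (historico.length : Int) ≥ tamanho_janela then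
        PySem.List.slice historico (some (-tamanho_janela)) none
      else PySem.List.slice historico none none
    let contagem := janela.foldl (fun c concurso =>
      concurso.foldl (fun c d =>
        if 1 ≤ d ∧ d ≤ 25 then c.modify d 0 (· + 1) else c) c)
      ((PySem.List.pyRange 1 26).foldl (fun c d => c.insert d 0) PySem.Dict.empty)
    contagem.items

-- ===== PORT B =====
def frequencias_por_elemento_py_alt (historico : List (List Int)) (tamanho_janela : Int) : List (Int × Int) :=
  let janela := if (historico.length : Int) ≥ tamanho_janela then
      PySem.List.slice historico (some (-tamanho_janela)) none
    else PySem.List.slice historico none none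
  (PySem.List.pyRange 1 26).map (fun d =>
    (d, janela.foldl (fun acc row => acc + (PySem.List.count row d : Int)) 0))

-- ===== PRECONDITION & SPEC =====
def Spec_frequencias_por_elemento_py (historico : List (List Int)) (tamanho_janela : Int) (out : List (Int × Int)) : Prop := out = frequencias_por_elemento_py_alt historico tamanho_janela
instance (historico : List (List Int)) (tamanho_janela : Int) (out : List (Int × Int)) : Decidable (Spec_frequencias_por_elemento_py historico tamanho_janela out) := by unfold Spec_frequencias_por_elemento_py; infer_instance

-- ===== CLAIM (what is proved, stated in full; the proofs are below) =====
def Claim_equal_frequencias_por_elemento_py : Prop := ∀ (historico : List (List Int)) (tamanho_janela : Int), Dom_frequencias_por_elemento_py historico tamanho_janela → Spec_frequencias_por_elemento_py historico tamanho_janela (frequencias_por_elemento_py historico tamanho_janela)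

-- ===== LEMMAS AND PROOFS =====

-- A's initial dict {d: 0 for d in range(1, 26)} has items [(1,0),…,(25,0)].
theorem pv_init_items :
    ((PySem.List.pyRange 1 26).foldl (fun c d => c.insert d 0) PySem.Dict.empty).items
      = (PySem.List.pyRange 1 26).map (fun d => (d, (0 : Int))) := by
  have h := PySem.Dict.items_foldl_insert_fresh (PySem.List.pyRange 1 26) id
    (fun _ => (0 : Int)) PySem.Dict.empty (by intro a _; simp)
    (by simpa using PySem.List.nodup_pyRange_one 1 26)
  simpa using h

theorem pv_init_keys :
    ((PySem.List.pyRange 1 26).foldl (fun c d => c.insert d (0 : Int)) PySem.Dict.empty).keys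
      = PySem.List.pyRange 1 26 := by
  unfold PySem.Dict.keys
  rw [pv_init_items]
  simp [Function.comp_def]

theorem pv_init_getD (k : Int) (hk : k ∈ PySem.List.pyRange 1 26) :
    ((PySem.List.pyRange 1 26).foldl (fun c d => c.insert d (0 : Int)) PySem.Dict.empty).getD k 0 = 0 := by
  have hm : (k, (0 : Int)) ∈ ((PySem.List.pyRange 1 26).foldl
      (fun c d => c.insert d (0 : Int)) PySem.Dict.empty).items := by
    rw [pv_init_items]; exact List.mem_map.mpr ⟨k, hk, rfl⟩
  exact PySem.Dict.getD_of_mem_items _ hm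
    (by rw [pv_init_keys]; exact PySem.List.nodup_pyRange_one 1 26) 0

-- Invariant of A's tally fold over the flattened window.
theorem pv_fold_inv (xs : List Int) (c : PySem.Dict Int Int)
    (hk : c.keys = PySem.List.pyRange 1 26) :
    (xs.foldl (fun c d => if 1 ≤ d ∧ d ≤ 25 then c.modify d 0 (· + 1) else c) c).keys
        = PySem.List.pyRange 1 26
    ∧ ∀ k : Int, (xs.foldl (fun c d => if 1 ≤ d ∧ d ≤ 25 then c.modify d 0 (· + 1) else c) c).getD k 0
        = c.getD k 0 + ((xs.filter (fun d => decide (1 ≤ d ∧ d ≤ 25))).count k : Int) := by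
  induction xs generalizing c with
  | nil => exact ⟨hk, by simp⟩
  | cons d xs ih =>
    by_cases hd : 1 ≤ d ∧ d ≤ 25
    · have hcont : c.contains d = true :=
        (PySem.Dict.contains_iff_mem_keys c d).mpr
          (by rw [hk]; exact PySem.List.mem_pyRange_one.mpr ⟨hd.1, by omega⟩)
      have hk' : (c.modify d 0 (· + 1)).keys = PySem.List.pyRange 1 26 := by
        rw [PySem.Dict.keys_modify, PySem.Dict.keys_insert_of_contains _ _ hcont, hk]
      obtain ⟨h1, h2⟩ := ih (c.modify d 0 (· + 1)) hk'
      refine ⟨by simpa [hd] using h1, ?_⟩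
      intro k
      have h2k := h2 k
      simp only [List.foldl_cons, if_pos hd] at *
      rw [h2k, PySem.Dict.getD_modify]
      have hf : (d :: xs).filter (fun d => decide (1 ≤ d ∧ d ≤ 25))
          = d :: xs.filter (fun d => decide (1 ≤ d ∧ d ≤ 25)) := by
        simp [hd]
      rw [hf, List.count_cons]
      by_cases hkd : k = d
      · subst hkd; simp; ring
      · simp [hkd, Ne.symm hkd]
    · obtain ⟨h1, h2⟩ := ih c hk
      refine ⟨by simpa [hd] using h1, ?_⟩
      intro k
      have hf : (d :: xs).filter (fun d => decide (1 ≤ d ∧ d ≤ 25))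
          = xs.filter (fun d => decide (1 ≤ d ∧ d ≤ 25)) := by
        simp [hd]
      simp only [List.foldl_cons, if_neg hd, hf]
      exact h2 k

-- ===== VERDICT (by name: the statement is the Claim_ definition above) =====
theorem frequencias_por_elemento_py_spec : Claim_equal_frequencias_por_elemento_py := by
  intro historico tamanho_janela _
  unfold Spec_frequencias_por_elemento_py frequencias_por_elemento_py frequencias_por_elemento_py_alt
  dsimp only
  by_cases he : historico = []
  · subst he
    rw [if_pos rfl, pv_init_items]
    simp [PySem.List.slice]
  · rw [if_neg he]
    set janela := if (historico.length : Int) ≥ tamanho_janela then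
        PySem.List.slice historico (some (-tamanho_janela)) none
      else PySem.List.slice historico none none with hj
    rw [← List.foldl_flatten]
    obtain ⟨hkeys, hgetD⟩ := pv_fold_inv janela.flatten _ pv_init_keys
    rw [PySem.Dict.items_eq_map_keys _
      (by rw [hkeys]; exact PySem.List.nodup_pyRange_one 1 26) 0, hkeys]
    apply List.map_congr_left
    intro k hkmem
    obtain ⟨hk1, hk2⟩ := PySem.List.mem_pyRange_one.mp hkmem
    rw [hgetD k, pv_init_getD k hkmem, PySem.List.foldl_add]
    have hcf : List.count k (List.filter (fun d => decide (1 ≤ d ∧ d ≤ 25)) janela.flatten)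
        = List.count k janela.flatten := List.count_filter (by simp; omega)
    rw [hcf, List.count_flatten]
    simp only [PySem.List.count_eq]
    rw [Nat.cast_list_sum, List.map_map]
    rfl
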